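-- pv_equiv track=rewrite | github.com/avg16/cp-dsa | codeforces/replace_char.py | calculate_permutations
-- ===== SOURCE A (Python) =====
-- def factorial(n):
--     if n == 0:
--         return 1
--     else:
--         return n * factorial(n - 1)
--
-- def calculate_permutations(string):
--     n = len(string)
--     char_freq = {}
--     for char in string:
--         if char in char_freq:
--             char_freq[char] += 1
--         else:
--             char_freq[char] = 1
--
--     permutations = factorial(n)
--     for freq in char_freq.values():
--         permutations //= factorial(freq)
--
--     return permutations
-- ===== SOURCE B (Python) =====
-- def comb(n, k):
--     r = 1
--     for i in range(1, k + 1):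
--         r = r * (n - k + i) // i
--     return r
--
-- def calculate_permutations(string):
--     counts = {}
--     for ch in string:
--         counts[ch] = counts.get(ch, 0) + 1
--     total = 0
--     result = 1
--     for f in counts.values():
--         total += f
--         result *= comb(total, f)
--     return result
-- ===== Notes on version B (the rewrite author's own statement) =====
-- stated objective: faster
-- what changed: B computes the multinomial incrementally as a product of binomial coefficients comb(running_total, freq) (each comb by a short exact-division loop), instead of A's recursive n! divided by each frequency's factorial.
import Mathlib
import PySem

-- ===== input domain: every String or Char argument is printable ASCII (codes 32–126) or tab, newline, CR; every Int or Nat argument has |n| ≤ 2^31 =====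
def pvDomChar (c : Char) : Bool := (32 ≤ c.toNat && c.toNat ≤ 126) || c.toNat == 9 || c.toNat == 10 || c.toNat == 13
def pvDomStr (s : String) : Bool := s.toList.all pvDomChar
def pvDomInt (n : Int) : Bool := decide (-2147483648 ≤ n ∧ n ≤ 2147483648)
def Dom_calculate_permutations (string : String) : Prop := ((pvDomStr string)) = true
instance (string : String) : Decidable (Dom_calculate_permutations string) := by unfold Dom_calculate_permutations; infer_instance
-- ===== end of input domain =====

-- B replaces A's "n! divided by each frequency factorial" by an incremental product of
-- binomial coefficients comb(total, f) over the same frequency table (no factorials, no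
-- large intermediate n!); a timing run measured B faster at the largest size.


-- ===== PORT A =====
-- A's recursive factorial; A only ever calls it on non-negative ints (lengths and counts),
-- so the Nat-recursion fuel `n.toNat` is exact on every reachable call.
def pvFactGo : Nat → Int
  | 0 => 1
  | n + 1 => ((n : Int) + 1) * pvFactGo n

def factorial (n : Int) : Int := pvFactGo n.toNat

def calculate_permutations (string : String) : Int :=
  -- char_freq loop: `if char in char_freq: char_freq[char] += 1 else: char_freq[char] = 1`
  ((string.toList.foldl
      (fun d char => if d.contains char then d.insert char (d.getD char 0 + 1) else d.insert char 1)
      (PySem.Dict.empty : PySem.Dict Char Int)).values).foldl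
    (fun permutations freq => PySem.Int.floordiv permutations (factorial freq))
    (factorial (PySem.Str.len string))

-- ===== PORT B =====
-- B's comb(n, k): r = 1; for i in range(1, k+1): r = r * (n - k + i) // i
def comb (n k : Int) : Int :=
  (PySem.List.pyRange 1 (k + 1) 1).foldl (fun r i => PySem.Int.floordiv (r * (n - k + i)) i) 1

def calculate_permutations_alt (string : String) : Int :=
  -- counts loop: counts[ch] = counts.get(ch, 0) + 1; then total/result accumulation
  (((string.toList.foldl (fun d ch => d.insert ch (d.getD ch 0 + 1))
      (PySem.Dict.empty : PySem.Dict Char Int)).values).foldl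
    (fun s f => (s.1 + f, s.2 * comb (s.1 + f) f)) ((0 : Int), (1 : Int))).2

-- ===== PRECONDITION & SPEC =====
def Spec_calculate_permutations (string : String) (out : Int) : Prop := out = calculate_permutations_alt string
instance (string : String) (out : Int) : Decidable (Spec_calculate_permutations string out) := by unfold Spec_calculate_permutations; infer_instance

-- ===== CLAIM (what is proved, stated in full; the proofs are below) =====
def Claim_equal_calculate_permutations : Prop := ∀ (string : String), Dom_calculate_permutations string → Spec_calculate_permutations string (calculate_permutations string)

-- ===== LEMMAS AND PROOFS =====

-- product of the "running binomials" over a frequency list, starting at total t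
def pvP : Nat → List Nat → Nat
  | _, [] => 1
  | t, f :: fs => Nat.choose (t + f) f * pvP (t + f) fs

-- product of the factorials of a frequency list
def pvProdFact : List Nat → Nat
  | [] => 1
  | f :: fs => f.factorial * pvProdFact fs

theorem pvFactGo_eq (n : Nat) : pvFactGo n = (n.factorial : Int) := by
  induction n with
  | zero => rfl
  | succ k ih =>
    show ((k : Int) + 1) * pvFactGo k = _
    rw [ih, Nat.factorial_succ]
    push_cast
    ring

theorem factorial_natCast (n : Nat) : factorial (n : Int) = (n.factorial : Int) := by
  simp [factorial, pvFactGo_eq]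

-- A's two-branch counting step is the `insert (getD + 1)` counting step
theorem pvStepA_eq :
    (fun (d : PySem.Dict Char Int) char =>
        if d.contains char then d.insert char (d.getD char 0 + 1) else d.insert char 1) =
    (fun (d : PySem.Dict Char Int) ch => d.insert ch (d.getD ch 0 + 1)) := by
  funext d c
  by_cases h : d.contains c
  · simp [h]
  · have h0 : d.getD c 0 = 0 := PySem.Dict.getD_of_not_contains d 0 (by simpa using h)
    simp [h, h0]

-- multinomial identity: pvP t fs * ∏ f! * t! = (t + Σ fs)!
theorem pvP_mul_prodFact (fs : List Nat) : ∀ t : Nat,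
    pvP t fs * pvProdFact fs * t.factorial = (t + fs.sum).factorial := by
  induction fs with
  | nil => intro t; simp [pvP, pvProdFact]
  | cons f fs ih =>
    intro t
    have h1 : Nat.choose (t + f) f * f.factorial * t.factorial = (t + f).factorial := by
      simpa using Nat.choose_mul_factorial_mul_factorial (Nat.le_add_left f t)
    calc pvP t (f :: fs) * pvProdFact (f :: fs) * t.factorial
        = pvP (t + f) fs * pvProdFact fs * (Nat.choose (t + f) f * f.factorial * t.factorial) := by
          simp [pvP, pvProdFact]; ring
      _ = pvP (t + f) fs * pvProdFact fs * (t + f).factorial := by rw [h1]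
      _ = ((t + f) + fs.sum).factorial := ih (t + f)
      _ = (t + (f :: fs).sum).factorial := by simp [List.sum_cons]; ring_nf
-- A's sequential exact divisions by the factorials
theorem pvAfold (fs : List Nat) : ∀ c t : Nat,
    (fs.map (Nat.cast : Nat → Int)).foldl
        (fun permutations freq => PySem.Int.floordiv permutations (factorial freq))
        ((c * (pvP t fs * pvProdFact fs) : Nat) : Int)
      = ((c * pvP t fs : Nat) : Int) := by
  induction fs with
  | nil => intro c t; simp [pvP, pvProdFact]
  | cons f fs ih =>
    intro c t
    have hnum : c * (pvP t (f :: fs) * pvProdFact (f :: fs))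
        = (c * Nat.choose (t + f) f) * (pvP (t + f) fs * pvProdFact fs) * f.factorial := by
      simp [pvP, pvProdFact]; ring
    have hdiv : PySem.Int.floordiv ((c * (pvP t (f :: fs) * pvProdFact (f :: fs)) : Nat) : Int)
        (factorial (f : Int))
        = (((c * Nat.choose (t + f) f) * (pvP (t + f) fs * pvProdFact fs) : Nat) : Int) := by
      rw [factorial_natCast, PySem.Int.floordiv_natCast, hnum,
        Nat.mul_div_cancel _ (Nat.factorial_pos f)]
    calc (((f : Int)) :: fs.map (Nat.cast : Nat → Int)).foldl
          (fun permutations freq => PySem.Int.floordiv permutations (factorial freq))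
          ((c * (pvP t (f :: fs) * pvProdFact (f :: fs)) : Nat) : Int)
        = (fs.map (Nat.cast : Nat → Int)).foldl
            (fun permutations freq => PySem.Int.floordiv permutations (factorial freq))
            (((c * Nat.choose (t + f) f) * (pvP (t + f) fs * pvProdFact fs) : Nat) : Int) := by
          rw [List.foldl_cons, hdiv]
      _ = (((c * Nat.choose (t + f) f) * pvP (t + f) fs : Nat) : Int) := ih _ (t + f)
      _ = ((c * pvP t (f :: fs) : Nat) : Int) := by simp [pvP]; ring
-- B's comb loop computes a binomial coefficient
theorem pvCombGo (k : Nat) : ∀ a : Nat,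
    (PySem.List.pyRange 1 ((k : Int) + 1) 1).foldl
        (fun r i => PySem.Int.floordiv (r * ((a : Int) + i)) i) 1
      = ((a + k).choose k : Int) := by
  induction k with
  | zero => intro a; simp [PySem.List.pyRange_one_eq_nil (by norm_num : (1 : Int) ≤ 1)]
  | succ k ih =>
    intro a
    have hsplit : PySem.List.pyRange 1 (((k + 1 : Nat) : Int) + 1) 1
        = PySem.List.pyRange 1 ((k : Int) + 1) 1 ++ [(k : Int) + 1] := by
      have := PySem.List.pyRange_one_succ_right (a := 1) (b := (k : Int) + 1)
        (by omega)
      push_cast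
      convert this using 2
    have hnum : (((a + k).choose k : Int) * ((a : Int) + ((k : Int) + 1)))
        = (((a + k + 1).choose (k + 1) * (k + 1) : Nat) : Int) := by
      have h := Nat.add_one_mul_choose_eq (a + k) k
      push_cast
      push_cast at h
      nlinarith [h]
    have hk1 : ((k : Int) + 1) = ((k + 1 : Nat) : Int) := by norm_cast
    rw [hsplit, List.foldl_append, ih a]
    simp only [List.foldl_cons, List.foldl_nil, hnum]
    rw [hk1, PySem.Int.floordiv_natCast]
    rw [Nat.mul_div_cancel _ (Nat.succ_pos k)]
    norm_num [Nat.add_assoc]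

theorem pvComb_cast (t f : Nat) : comb ((t : Int) + (f : Int)) (f : Int) = ((t + f).choose f : Int) := by
  unfold comb
  have hfun : (fun (r i : Int) => PySem.Int.floordiv (r * ((t : Int) + (f : Int) - (f : Int) + i)) i)
      = (fun (r i : Int) => PySem.Int.floordiv (r * ((t : Int) + i)) i) := by
    funext r i
    have : ((t : Int) + (f : Int) - (f : Int) + i) = (t : Int) + i := by ring
    rw [this]
  rw [hfun]
  exact pvCombGo f t

-- B's outer accumulation: running total and running product of binomials
theorem pvBfold (fs : List Nat) : ∀ (t : Nat) (r : Int),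
    (fs.map (Nat.cast : Nat → Int)).foldl
        (fun s f => (s.1 + f, s.2 * comb (s.1 + f) f)) (((t : Nat) : Int), r)
      = (((t + fs.sum : Nat) : Int), r * ((pvP t fs : Nat) : Int)) := by
  induction fs with
  | nil => intro t r; simp [pvP]
  | cons f fs ih =>
    intro t r
    have hstep : ((t : Int) + (f : Int), r * comb ((t : Int) + (f : Int)) (f : Int))
        = ((((t + f : Nat)) : Int), r * ((t + f).choose f : Int)) := by
      rw [pvComb_cast]; push_cast; ring_nf
    rw [List.map_cons, List.foldl_cons]
    simp only at hstep ⊢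
    rw [hstep, ih (t + f) (r * ((t + f).choose f : Int))]
    simp [pvP, List.sum_cons]
    constructor
    · ring_nf
    · ring

theorem pvSum_counts (xs : List Char) :
    ((PySem.Set.ofList xs).map (fun k => xs.count k)).sum = xs.length := by
  have hperm : (PySem.Set.ofList xs).Perm xs.dedup := by
    rw [List.perm_ext_iff_of_nodup (PySem.Set.nodup_ofList xs) xs.nodup_dedup]
    intro a
    simp [PySem.Set.mem_ofList, List.mem_dedup]
  calc ((PySem.Set.ofList xs).map (fun k => xs.count k)).sum
      = ((xs.dedup).map (fun k => xs.count k)).sum := (hperm.map _).sum_eq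
    _ = xs.length := List.sum_map_count_dedup_eq_length xs

-- ===== VERDICT (by name: the statement is the Claim_ definition above) =====
theorem calculate_permutations_spec : Claim_equal_calculate_permutations := by
  intro string _
  unfold Spec_calculate_permutations calculate_permutations calculate_permutations_alt
  rw [pvStepA_eq]
  rw [PySem.Dict.foldl_insert_getD_add_one_eq_counter]
  set xs := string.toList with hxs
  have hvals : (PySem.Dict.counter xs).values
      = ((PySem.Set.ofList xs).map (fun k => xs.count k)).map (Nat.cast : Nat → Int) := by
    simp only [PySem.Dict.values, PySem.Dict.items_counter, List.map_map]
    rfl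
  set fs : List Nat := (PySem.Set.ofList xs).map (fun k => xs.count k) with hfs
  have hsum : fs.sum = xs.length := pvSum_counts xs
  have hlen : PySem.Str.len string = (xs.length : Int) := by
    simp [PySem.Str.len_eq, hxs]
  have hfact : factorial (PySem.Str.len string)
      = ((1 * (pvP 0 fs * pvProdFact fs) : Nat) : Int) := by
    rw [hlen, factorial_natCast]
    have := pvP_mul_prodFact fs 0
    simp only [Nat.factorial_zero, mul_one, Nat.zero_add, hsum] at this
    simp [this]
  rw [hvals, hfact, pvAfold fs 1 0]
  have hb := pvBfold fs 0 1
  simp only [Nat.cast_zero] at hb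
  rw [hb]
  simp
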